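-- pv_equiv track=rewrite | github.com/diego59x/Compiladores_OD | utils/Validations.py | validateIfClause
-- ===== SOURCE A (Python) =====
-- def validateValueType(value):
--     if value == "": return False, 'Unknown Error'
--     if value[0] == '"' and value[-1] == '"':
--         return True, 'String'
--     elif value == 'true' or value == 'false':
--         return True, 'Bool'
--     elif value[0] == '"' or value[-1] == '"':
--         return False, 'String must be between double quotes.'
--     else:
--         try:
--             int(value)
--             return True, 'Int'
--         except:
--             return True, 'Variable'
--
-- def validateIfClause(scope, formals, symbols_table, condition, recursion_depth=0):
--     # Protección contra referencias circulares
--     if recursion_depth > 10:  # Puedes ajustar este número según tus necesidades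
--         return False, "Possible circular reference detected."
--
--     valid, type = validateValueType(condition)
--     if not valid:
--         return False, type + '111'
--     if type == 'Variable':
--         # Recursivamente verifica el valor de la variable
--         if condition in symbols_table[scope]['variables']:
--             new_condition = symbols_table[scope]['variables'][condition]['value']
--             return validateIfClause(scope, formals, symbols_table, new_condition, recursion_depth + 1)
--         else:
--             return False, f'{ condition } is not defined in the current scope. 2'
--     elif type == 'Bool':
--         return True, 'Success'
--     else:
--         return False, f'If clause condition must be of type Bool, got { type } instead.'
-- ===== SOURCE B (Python) =====
-- def _kind(value):
--     """Classify a condition value into a type tag."""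
--     if value in ('true', 'false'):
--         return 'Bool'
--     if value == '':
--         return 'Err'
--     starts, ends = value.startswith('"'), value.endswith('"')
--     if starts != ends:
--         return 'ErrQuote'
--     if starts:
--         return 'String'
--     try:
--         int(value)
--         return 'Int'
--     except ValueError:
--         return 'Variable'
--
-- def validateIfClause(scope, formals, symbols_table, condition, recursion_depth=0):
--     budget = 10 - recursion_depth
--     if budget < 0:
--         return False, "Possible circular reference detected."
--     variables = None  # the scope's variable dict, looked up lazily once
--     cond = condition
--     for _ in range(budget + 1):
--         kind = _kind(cond)
--         if kind != 'Variable':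
--             break
--         if variables is None:
--             variables = symbols_table[scope]['variables']
--         if cond not in variables:
--             return False, f'{ cond } is not defined in the current scope. 2'
--         cond = variables[cond]['value']
--     else:
--         return False, "Possible circular reference detected."
--     if kind == 'Bool':
--         return True, 'Success'
--     if kind == 'Err':
--         return False, 'Unknown Error111'
--     if kind == 'ErrQuote':
--         return False, 'String must be between double quotes.111'
--     return False, f'If clause condition must be of type Bool, got { kind } instead.'
-- ===== Notes on version B (the rewrite author's own statement) =====
-- stated objective: simpler
-- what changed: A's self-recursive validator (re-passing all five arguments and re-looking-up symbols_table[scope]['variables'] on every hop) is replaced by a budgeted for-loop over the variable-reference chain with a once-cached variables dict and a type-tag classifier, rendering each result message in exactly one place after the loop.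
import Mathlib
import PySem

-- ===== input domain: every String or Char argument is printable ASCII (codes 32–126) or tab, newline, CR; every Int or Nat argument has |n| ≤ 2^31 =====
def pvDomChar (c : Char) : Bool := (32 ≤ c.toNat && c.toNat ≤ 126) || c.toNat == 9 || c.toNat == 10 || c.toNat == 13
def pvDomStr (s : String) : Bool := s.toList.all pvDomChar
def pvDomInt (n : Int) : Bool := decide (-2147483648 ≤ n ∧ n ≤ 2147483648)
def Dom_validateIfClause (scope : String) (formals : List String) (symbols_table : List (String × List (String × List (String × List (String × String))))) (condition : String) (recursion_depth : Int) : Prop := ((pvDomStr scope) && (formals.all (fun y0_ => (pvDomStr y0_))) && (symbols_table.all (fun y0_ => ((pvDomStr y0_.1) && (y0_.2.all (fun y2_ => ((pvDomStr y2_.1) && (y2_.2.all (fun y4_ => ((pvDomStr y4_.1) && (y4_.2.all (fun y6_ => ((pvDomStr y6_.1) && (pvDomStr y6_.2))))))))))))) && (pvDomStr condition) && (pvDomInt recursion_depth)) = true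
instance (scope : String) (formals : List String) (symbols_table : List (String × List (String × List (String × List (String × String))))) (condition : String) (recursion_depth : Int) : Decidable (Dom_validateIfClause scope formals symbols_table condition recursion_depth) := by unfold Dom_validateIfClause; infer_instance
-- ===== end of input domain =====

-- B replaces A's self-recursion by a budgeted for-loop that resolves the variable-reference
-- chain with a once-cached 'variables' dict and a string type-tag classifier, then renders the
-- answer from the loop's outcome (objective: simpler decomposition; same cost; A mutates nothing).

-- ===== PORT A =====
-- literal port of validateValueType
def pvVVT (value : String) : Bool × String :=
  match value.toList with
  | [] => (false, "Unknown Error")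
  | c :: rest =>
    if c = '"' ∧ (c :: rest).getLast (List.cons_ne_nil c rest) = '"' then (true, "String")
    else if value = "true" ∨ value = "false" then (true, "Bool")
    else if c = '"' ∨ (c :: rest).getLast (List.cons_ne_nil c rest) = '"' then
      (false, "String must be between double quotes.")
    else
      match PySem.Int.ofStr? value with  -- int(value): ValueError = none
      | some _ => (true, "Int")
      | none => (true, "Variable")

def validateIfClause (scope : String) (formals : List String) (symbols_table : List (String × List (String × List (String × List (String × String))))) (condition : String) (recursion_depth : Int) : Bool × String :=
  if _h : recursion_depth > 10 then (false, "Possible circular reference detected.")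
  else
    match pvVVT condition with
    | (valid, ty) =>
      if valid = false then (false, ty ++ "111")
      else if ty = "Variable" then
        match (PySem.Dict.ofList symbols_table).get? scope with
        | none => (false, "")  -- Python raises KeyError here; excluded by Pre_
        | some sc =>
          match (PySem.Dict.ofList sc).get? "variables" with
          | none => (false, "")  -- Python raises KeyError here; excluded by Pre_
          | some vars =>
            if (PySem.Dict.ofList vars).contains condition then
              match (PySem.Dict.ofList vars).get? condition with
              | none => (false, "")  -- unreachable (contains = true)
              | some entry =>
                match (PySem.Dict.ofList entry).get? "value" with
                | none => (false, "")  -- Python raises KeyError here; excluded by Pre_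
                | some newc => validateIfClause scope formals symbols_table newc (recursion_depth + 1)
            else (false, condition ++ " is not defined in the current scope. 2")
      else if ty = "Bool" then (true, "Success")
      else (false, "If clause condition must be of type Bool, got " ++ ty ++ " instead.")
termination_by (11 - recursion_depth).toNat
decreasing_by omega

-- ===== PORT B =====
-- literal port of Source B's _kind (startswith('"')/endswith('"') of a 1-char string = first/last
-- char test, exact)
def pvKind (v : String) : String :=
  if v = "true" ∨ v = "false" then "Bool"
  else
    match v.toList with
    | [] => "Err"
    | c :: rest =>
      -- starts, ends = startswith('"'), endswith('"'); starts != ends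
      if decide (c = '"') ≠ decide ((c :: rest).getLast (List.cons_ne_nil c rest) = '"') then
        "ErrQuote"
      else if c = '"' then "String"
      else if (PySem.Int.ofStr? v).isSome then "Int"
      else "Variable"

-- outcome of Source B's for-loop over the reference chain
inductive PvRes : Type
  | final : String → PvRes        -- loop broke with this non-'Variable' kind
  | undef : String → PvRes        -- this name was not in the variables dict
  | circularR : PvRes             -- the budget (for-loop range) ran out
  | crashR : PvRes                -- Python raises KeyError here; excluded by Pre_
deriving DecidableEq, Repr

-- 'if variables is None: variables = symbols_table[scope]['variables']': the cached dict if
-- present, otherwise the lookup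
def pvLookupVars (scope : String) (st : List (String × List (String × List (String × List (String × String))))) (vars? : Option (List (String × List (String × String)))) : Option (List (String × List (String × String))) :=
  match vars? with
  | some vs => some vs
  | none => ((PySem.Dict.ofList st).get? scope).bind
      (fun sc => (PySem.Dict.ofList sc).get? "variables")

-- the for-loop: fuel = remaining iterations, vars? = the lazily cached variables dict
def pvResolve (scope : String) (st : List (String × List (String × List (String × List (String × String))))) : Nat → Option (List (String × List (String × String))) → String → PvRes
  | 0, _, _ => .circularR
  | fuel + 1, vars?, cond =>
    if pvKind cond ≠ "Variable" then .final (pvKind cond)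
    else
      match pvLookupVars scope st vars? with
      | none => .crashR
      | some vars =>
        match (PySem.Dict.ofList vars).get? cond with
        | none => .undef cond
        | some entry =>
          match (PySem.Dict.ofList entry).get? "value" with
          | none => .crashR
          | some v => pvResolve scope st fuel (some vars) v

-- the tail of Source B: turn the loop's outcome into the result pair
def pvRender : PvRes → Bool × String
  | .circularR => (false, "Possible circular reference detected.")
  | .crashR => (false, "")
  | .undef c => (false, c ++ " is not defined in the current scope. 2")
  | .final k =>
    if k = "Bool" then (true, "Success")
    else if k = "Err" then (false, "Unknown Error111")
    else if k = "ErrQuote" then (false, "String must be between double quotes.111")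
    else (false, "If clause condition must be of type Bool, got " ++ k ++ " instead.")

def validateIfClause_alt (scope : String) (formals : List String) (symbols_table : List (String × List (String × List (String × List (String × String))))) (condition : String) (recursion_depth : Int) : Bool × String :=
  let budget := 10 - recursion_depth
  if budget < 0 then (false, "Possible circular reference detected.")
  else pvRender (pvResolve scope symbols_table (budget + 1).toNat none condition)

-- ===== PRECONDITION & SPEC =====
-- an identifier-like value: A's validateValueType would classify it 'Variable'
def pvVarLike (value : String) : Bool :=
  match value.toList with
  | [] => false
  | c :: rest =>
    !decide (c = '"') && !decide ((c :: rest).getLast (List.cons_ne_nil c rest) = '"') &&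
    !decide (value = "true") && !decide (value = "false") && !(PySem.Int.ofStr? value).isSome

-- walk the deterministic reference chain: 0 = exits without a failed lookup, 1 = a lookup
-- (scope / 'variables' / 'value') fails, 2 = still pending when the fuel runs out
def pvProbe (scope : String) (st : List (String × List (String × List (String × List (String × String))))) : Nat → String → Int
  | 0, _ => 2
  | fuel + 1, cond =>
    if pvVarLike cond then
      match ((PySem.Dict.ofList st).get? scope).bind
          (fun sc => (PySem.Dict.ofList sc).get? "variables") with
      | none => 1
      | some vars =>
        match (PySem.Dict.ofList vars).get? cond with
        | none => 0
        | some entry =>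
          match (PySem.Dict.ofList entry).get? "value" with
          | none => 1
          | some v => pvProbe scope st fuel v
      else 0

-- Pre_ excludes exactly the inputs on which the Python A raises: KeyError when a failed
-- scope / 'variables' / 'value' lookup is reached along the variable-reference chain within
-- A's depth budget, and the infeasible chains that need more than 900 resolution steps (there
-- A's self-recursion overflows Python's recursion limit, RecursionError, or is within a few
-- frames of it).
-- (The proved equality below holds even at the failed-lookup placeholders, so the proof does
-- not consume Pre_; Pre_ delimits where the Python A actually returns a value.)
def Pre_validateIfClause (scope : String) (formals : List String) (symbols_table : List (String × List (String × List (String × List (String × String))))) (condition : String) (recursion_depth : Int) : Prop :=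
  pvProbe scope symbols_table (min (11 - recursion_depth).toNat 901) condition = 0 ∨
    (pvProbe scope symbols_table (min (11 - recursion_depth).toNat 901) condition = 2 ∧
      (11 - recursion_depth).toNat ≤ 901)
instance (scope : String) (formals : List String) (symbols_table : List (String × List (String × List (String × List (String × String))))) (condition : String) (recursion_depth : Int) : Decidable (Pre_validateIfClause scope formals symbols_table condition recursion_depth) := by unfold Pre_validateIfClause; infer_instance

def pvWitness_validateIfClause : String × List String × (List (String × List (String × List (String × List (String × String))))) × String × Int :=
  ("s", [], [("s", [("variables", [("x", [("value", "true")])])])], "x", 0)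

def Spec_validateIfClause (scope : String) (formals : List String) (symbols_table : List (String × List (String × List (String × List (String × String))))) (condition : String) (recursion_depth : Int) (out : Bool × String) : Prop := out = validateIfClause_alt scope formals symbols_table condition recursion_depth
instance (scope : String) (formals : List String) (symbols_table : List (String × List (String × List (String × List (String × String))))) (condition : String) (recursion_depth : Int) (out : Bool × String) : Decidable (Spec_validateIfClause scope formals symbols_table condition recursion_depth out) := by unfold Spec_validateIfClause; infer_instance

-- ===== CLAIM (what is proved, stated in full; the proofs are below) =====
def Claim_equal_validateIfClause : Prop := ∀ (scope : String) (formals : List String) (symbols_table : List (String × List (String × List (String × List (String × String))))) (condition : String) (recursion_depth : Int), Dom_validateIfClause scope formals symbols_table condition recursion_depth → Pre_validateIfClause scope formals symbols_table condition recursion_depth → Spec_validateIfClause scope formals symbols_table condition recursion_depth (validateIfClause scope formals symbols_table condition recursion_depth)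

-- ===== LEMMAS AND PROOFS =====

-- A's validateValueType expressed through B's type tag
lemma pvVVT_eq_kind (v : String) :
    pvVVT v =
      (if pvKind v = "Err" then (false, "Unknown Error")
       else if pvKind v = "ErrQuote" then (false, "String must be between double quotes.")
       else (true, pvKind v)) := by
  by_cases hT : v = "true"
  · subst hT; decide
  by_cases hF : v = "false"
  · subst hF; decide
  unfold pvVVT pvKind
  cases h : v.toList with
  | nil => simp [hT, hF]
  | cons c rest =>
    generalize (c :: rest).getLast (List.cons_ne_nil c rest) = L
    by_cases h1 : c = '"' <;> by_cases h2 : L = '"' <;>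
      cases ho : PySem.Int.ofStr? v <;>
        (try simp [h1, hT, hF]) <;> (try (split_ifs <;> simp_all))

-- resolving the lazily cached dict under the coherence invariant
lemma pvLookupVars_eq (scope : String) (st : List (String × List (String × List (String × List (String × String))))) (vars? : Option (List (String × List (String × String))))
    (h : vars? = none ∨
      ((PySem.Dict.ofList st).get? scope).bind
        (fun sc => (PySem.Dict.ofList sc).get? "variables") = vars?) :
    pvLookupVars scope st vars? =
      ((PySem.Dict.ofList st).get? scope).bind
        (fun sc => (PySem.Dict.ofList sc).get? "variables") := by
  cases vars? with
  | none => rfl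
  | some vs =>
    rcases h with h | h
    · cases h
    · exact h.symm

-- the heart: A's recursion (at depth budget n) equals B's for-loop (at fuel n) under a
-- coherent cache of the 'variables' dict
lemma main_eq (n : Nat) : ∀ (scope : String) (formals : List String)
    (st : List (String × List (String × List (String × List (String × String)))))
    (cond : String) (depth : Int) (vars? : Option (List (String × List (String × String)))),
    (11 - depth).toNat = n →
    (vars? = none ∨
      ((PySem.Dict.ofList st).get? scope).bind
        (fun sc => (PySem.Dict.ofList sc).get? "variables") = vars?) →
    validateIfClause scope formals st cond depth = pvRender (pvResolve scope st n vars? cond) := by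
  induction n with
  | zero =>
    intro scope formals st cond depth vars? hn _
    have hd : depth > 10 := by omega
    rw [validateIfClause]
    simp [hd, pvResolve, pvRender]
  | succ n ih =>
    intro scope formals st cond depth vars? hn hcache
    have hd : ¬ depth > 10 := by omega
    rw [validateIfClause]
    simp only [pvResolve]
    rw [pvLookupVars_eq scope st vars? hcache]
    simp only [hd, dif_neg, not_false_iff]
    rw [pvVVT_eq_kind]
    by_cases hvar : pvKind cond = "Variable"
    · -- the chain continues: both sides do the same lookups
      simp only [hvar]
      norm_num
      cases hsc : (PySem.Dict.ofList st).get? scope with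
      | none => simp [pvRender]
      | some sc =>
        simp only [Option.bind_some]
        cases hv : (PySem.Dict.ofList sc).get? "variables" with
        | none => simp [pvRender]
        | some vars =>
          cases hg : (PySem.Dict.ofList vars).get? cond with
          | none =>
            have hc : (PySem.Dict.ofList vars).contains cond = false :=
              (PySem.Dict.get?_eq_none_iff_contains _ _).mp hg
            simp [hc, hg, pvRender]
          | some entry =>
            have hc : (PySem.Dict.ofList vars).contains cond = true := by
              rw [PySem.Dict.contains_eq_isSome_get?, hg]; rfl
            simp only [hc, if_true, hg]
            cases hval : (PySem.Dict.ofList entry).get? "value" with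
            | none => simp [pvRender]
            | some newc =>
              simp only []
              exact ih scope formals st newc (depth + 1) (some vars) (by omega)
                (Or.inr (by rw [hsc, Option.bind_some, hv]))
    · -- the loop breaks: match A's branch on the tag to B's renderer
      simp only [hvar, ne_eq, not_false_iff, if_true, pvRender]
      by_cases hE : pvKind cond = "Err"
      · simp [hE]
      by_cases hQ : pvKind cond = "ErrQuote"
      · simp [hQ]
      by_cases hB : pvKind cond = "Bool"
      · simp [hB]
      · simp [hE, hQ, hB, hvar]

-- ===== VERDICT (by name: the statement is the Claim_ definition above) =====
theorem validateIfClause_spec : Claim_equal_validateIfClause := by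
  intro scope formals st cond depth _ _
  unfold Spec_validateIfClause validateIfClause_alt
  by_cases hd : 10 - depth < 0
  · rw [validateIfClause]
    simp [show depth > 10 by omega, hd]
  · simp only [hd, if_neg, not_false_iff]
    exact main_eq ((10 - depth + 1).toNat) scope formals st cond depth none (by omega) (Or.inl rfl)
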